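-- pv_equiv track=rewrite | github.com/pc5401/my_BOJ | 백준/Silver/14235. 크리스마스 선물/크리스마스 선물.py | solve
-- ===== SOURCE A (Python) =====
-- import heapq
--
-- def solve(N: int, A: list[int]) -> list[int]:
--     rtn = []
--     gifts = []
--
--     for a in A:
--         if a[0] == 0 and gifts:
--             gift = heapq.heappop(gifts)
--             rtn.append(-gift)
--         elif a[0] == 0:
--             rtn.append(-1)
--         else:
--             for new_gift in a[1:]:
--                 heapq.heappush(gifts, -new_gift)
--
--     return rtn
-- ===== SOURCE B (Python) =====
-- def solve(N: int, A: list[int]) -> list[int]: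
--     rtn = []
--     gifts = []
--
--     for a in A:
--         if a[0] == 0:
--             if gifts:
--                 m = max(gifts)
--                 gifts.remove(m)
--                 rtn.append(m)
--             else:
--                 rtn.append(-1)
--         else:
--             gifts.extend(a[1:])
--
--     return rtn
-- ===== Notes on version B (the rewrite author's own statement) =====
-- stated objective: simpler
-- what changed: Replaces the heap of negated gift values by a plain list of the actual values, answering each 0-query with a linear max() scan plus remove() instead of heapq push/pop on negations.
import Mathlib
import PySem

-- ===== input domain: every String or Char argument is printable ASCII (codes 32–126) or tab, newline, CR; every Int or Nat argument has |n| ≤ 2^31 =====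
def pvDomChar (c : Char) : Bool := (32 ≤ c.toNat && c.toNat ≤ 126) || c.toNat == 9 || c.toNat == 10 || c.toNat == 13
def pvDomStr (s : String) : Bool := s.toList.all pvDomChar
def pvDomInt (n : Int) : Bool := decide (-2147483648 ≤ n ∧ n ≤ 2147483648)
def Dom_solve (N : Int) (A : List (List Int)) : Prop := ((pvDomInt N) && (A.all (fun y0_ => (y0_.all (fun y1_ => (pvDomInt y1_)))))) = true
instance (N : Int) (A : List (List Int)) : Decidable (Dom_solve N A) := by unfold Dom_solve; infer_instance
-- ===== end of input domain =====

-- B replaces A's heap of negated values by a plain list scanned with max()/remove() on each query: simpler, no heapq.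

-- ===== PORT A =====
-- heapq calls ported by their contract, which is exact here because the elements are Ints:
-- heappush adds the element to the heap's multiset; heappop removes and returns the minimum
-- value (ties are equal Ints, and only the popped values are observable in A's output).
def pvHeappush (h : List Int) (x : Int) : List Int := h ++ [x]

def pvHeappop (h : List Int) : Int × List Int :=
  match PySem.List.min? h (fun y => y) with
  | none => (0, h)      -- heappop on an empty heap raises; A guards with `and gifts`, unreachable
  | some m => (m, (PySem.List.remove? h m).getD h)

def pvStepA (st : List Int × List Int) (a : List Int) : List Int × List Int :=
  match PySem.List.pyGet? a 0 with
  | none => st          -- a[0] raises IndexError on an empty row; excluded by Pre_solve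
  | some a0 =>
    if a0 = 0 ∧ st.2 ≠ [] then
      let p := pvHeappop st.2
      (st.1 ++ [-p.1], p.2)
    else if a0 = 0 then
      (st.1 ++ [-1], st.2)
    else
      (st.1, (PySem.List.slice a (some 1) none).foldl (fun h x => pvHeappush h (-x)) st.2)

def solve (N : Int) (A : List (List Int)) : List Int :=
  (A.foldl pvStepA ([], [])).1

-- ===== PORT B =====
def pvStepB (st : List Int × List Int) (a : List Int) : List Int × List Int :=
  match PySem.List.pyGet? a 0 with
  | none => st          -- a[0] raises IndexError on an empty row; excluded by Pre_solve
  | some a0 =>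
    if a0 = 0 then
      match PySem.List.max? st.2 (fun y => y) with
      | some m => (st.1 ++ [m], (PySem.List.remove? st.2 m).getD st.2)
      | none => (st.1 ++ [-1], st.2)
    else
      (st.1, st.2 ++ PySem.List.slice a (some 1) none)

def solve_alt (N : Int) (A : List (List Int)) : List Int :=
  (A.foldl pvStepB ([], [])).1

-- ===== PRECONDITION & SPEC =====
-- Pre_ excludes inputs with an empty row, on which both Pythons raise IndexError at a[0].
def Pre_solve (N : Int) (A : List (List Int)) : Prop := ∀ a ∈ A, a ≠ []
instance (N : Int) (A : List (List Int)) : Decidable (Pre_solve N A) := by unfold Pre_solve; infer_instance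
def pvWitness_solve : Int × List (List Int) := (3, [[2, 5, 3], [0], [1, 7], [0], [0], [0]])

def Spec_solve (N : Int) (A : List (List Int)) (out : List Int) : Prop := out = solve_alt N A
instance (N : Int) (A : List (List Int)) (out : List Int) : Decidable (Spec_solve N A out) := by unfold Spec_solve; infer_instance

-- ===== CLAIM (what is proved, stated in full; the proofs are below) =====
def Claim_equal_solve : Prop := ∀ (N : Int) (A : List (List Int)), Dom_solve N A → Pre_solve N A → Spec_solve N A (solve N A)

-- ===== LEMMAS AND PROOFS =====

-- folding min over the negated list is the negation of folding max
theorem pv_foldl_min_neg (t : List Int) (x : Int) :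
    (t.map (fun y => -y)).foldl min (-x) = -(t.foldl max x) := by
  induction t generalizing x with
  | nil => rfl
  | cons a t ih =>
    rw [List.map_cons, List.foldl_cons, List.foldl_cons, ← ih (max x a)]
    congr 1
    omega

-- min over the negated nonempty list is the negation of max over the list
theorem pv_min_neg_cons (x : Int) (t : List Int) :
    PySem.List.min? ((x :: t).map (fun y => -y)) (fun y => y) = some (-(t.foldl max x)) := by
  rw [List.map_cons, PySem.List.min?_id_cons, pv_foldl_min_neg]

-- removing the first occurrence of -m from the negated list mirrors removing m
theorem pv_remove_neg (l : List Int) (m : Int) :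
    PySem.List.remove? (l.map (fun x => -x)) (-m)
      = (PySem.List.remove? l m).map (List.map (fun x => -x)) := by
  induction l with
  | nil => rfl
  | cons x t ih =>
    by_cases h : x = m
    · subst h; simp [PySem.List.remove?_cons_self]
    · have h' : (-x : Int) ≠ -m := by omega
      rw [List.map_cons, PySem.List.remove?_cons_of_ne _ h', PySem.List.remove?_cons_of_ne _ h, ih]
      cases PySem.List.remove? t m <;> simp

theorem pv_flat (l : List Int) :
    (l.map (fun x => [-x])).flatten = l.map (fun x => -x) := by
  induction l with
  | nil => rfl
  | cons a t ih => simp [ih]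

theorem pv_step_rel (st : List Int × List Int) (a : List Int) :
    pvStepA (st.1, st.2.map (fun x => -x)) a
      = ((pvStepB st a).1, (pvStepB st a).2.map (fun x => -x)) := by
  unfold pvStepA pvStepB
  cases hg : PySem.List.pyGet? a 0 with
  | none => rfl
  | some a0 =>
    by_cases h0 : a0 = 0
    · cases hl : st.2 with
      | nil => simp [h0, PySem.List.max?]
      | cons x t =>
        have hmax : PySem.List.max? (x :: t) (fun y => y) = some (t.foldl max x) :=
          PySem.List.max?_id_cons x t
        have hmem : t.foldl max x ∈ (x :: t) := PySem.List.max?_mem hmax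
        have he : PySem.List.remove? (x :: t) (t.foldl max x) = some ((x :: t).erase (t.foldl max x)) :=
          PySem.List.remove?_eq_some_erase _ _ hmem
        have hpop : pvHeappop (-x :: t.map (fun y => -y))
            = (-(t.foldl max x), ((x :: t).erase (t.foldl max x)).map (fun y => -y)) := by
          unfold pvHeappop
          rw [show (-x :: t.map (fun y => -y)) = (x :: t).map (fun y => -y) from rfl,
            pv_min_neg_cons]
          simp only [pv_remove_neg, he]
          rfl
        simp [h0, hpop, hmax, he]
    · simp [h0, pvHeappush, pv_flat]

theorem pv_fold_rel (A : List (List Int)) (r g : List Int) :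
    A.foldl pvStepA (r, g.map (fun x => -x))
      = ((A.foldl pvStepB (r, g)).1, (A.foldl pvStepB (r, g)).2.map (fun x => -x)) := by
  induction A generalizing r g with
  | nil => rfl
  | cons a t ih =>
    simp only [List.foldl_cons, pv_step_rel (r, g) a]
    exact ih _ _

-- ===== VERDICT (by name: the statement is the Claim_ definition above) =====
theorem solve_spec : Claim_equal_solve := by
  intro N A _ _
  unfold Spec_solve solve solve_alt
  have := pv_fold_rel A [] []
  simpa using congrArg Prod.fst this
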